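-- pv_equiv track=rewrite | github.com/JungChangwoo/Algorithm_PS | Kakao/NewId.py | solution
-- ===== SOURCE A (Python) =====
-- def solution(new_id):
--     new_id = new_id.lower()
--
--     for s in new_id:
--         if s.isalnum() or s == '-' or s == '_' or s == '.':
--             continue
--         else:
--             new_id = new_id.replace(s, '')
--
--     stack = []
--     for s in new_id:
--         if stack and (stack[-1] == '.' and s == '.'):
--             continue
--         stack.append(s)
--     new_id = ''.join(s for s in stack)
--
--     if new_id and new_id[0] == '.':
--         new_id = new_id[1:]
--     if new_id and new_id[-1] == '.':
--         new_id = new_id[:-1]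
--
--     if not new_id:
--         new_id = 'a'
--
--     if len(new_id) >= 16:
--         new_id = new_id[:15]
--
--     if new_id and new_id[-1] == '.':
--         new_id = new_id[:-1]
--
--     if len(new_id) <= 2:
--         new_id += new_id[-1] * (3 - len(new_id))
--     return new_id
-- ===== SOURCE B (Python) =====
-- def solution(new_id):
--     kept = [c for c in new_id.lower() if c.isalnum() or c in '-_.']
--     s = '.'.join(w for w in ''.join(kept).split('.') if w) or 'a'
--     s = s[:15].rstrip('.')
--     return s.ljust(3, s[-1])
-- ===== Notes on version B (the rewrite author's own statement) =====
-- stated objective: simpler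
-- what changed: The maintained stack that collapses consecutive dots and the four positional dot-fix-up branches are replaced by a tokenization: the filtered string is split on '.', empty segments are dropped and the words rejoined with single dots (which also strips edge dots), then rstrip/ljust handle truncation padding; the per-character replace() filter pass becomes one comprehension.
import Mathlib
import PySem

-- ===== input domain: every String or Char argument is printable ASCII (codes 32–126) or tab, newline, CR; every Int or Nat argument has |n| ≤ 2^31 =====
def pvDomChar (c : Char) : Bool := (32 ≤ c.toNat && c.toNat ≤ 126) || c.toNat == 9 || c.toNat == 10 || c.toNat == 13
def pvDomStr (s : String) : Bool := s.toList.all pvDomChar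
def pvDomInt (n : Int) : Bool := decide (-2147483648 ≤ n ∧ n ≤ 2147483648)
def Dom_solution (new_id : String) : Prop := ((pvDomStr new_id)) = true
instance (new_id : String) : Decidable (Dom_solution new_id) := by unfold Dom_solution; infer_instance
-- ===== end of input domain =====

-- B replaces A's dot-collapsing stack and the four positional dot fix-ups by a tokenization
-- (split the filtered string on '.', drop empty segments, rejoin with single dots), and the
-- replace()-based filter pass by one comprehension; same return value, simpler code.

-- ===== PORT A =====
-- Python's `s.isalnum() or s == '-' or s == '_' or s == '.'`
def keepA (c : Char) : Bool := PySem.Chars.isalnum c || c == '-' || c == '_' || c == '.'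
-- one step of A's dot-collapsing stack loop
def stepA (st : List Char) (c : Char) : List Char :=
  if st ≠ [] ∧ st.getLast? = some '.' ∧ c = '.' then st else st ++ [c]

def solution (new_id : String) : String :=
  -- new_id = new_id.lower()
  let l0 := PySem.Chars.lower new_id.toList
  -- for s in new_id: … new_id = new_id.replace(s, '')   (iterates over the lowered original)
  let l1 := l0.foldl (fun cur c => if keepA c then cur else PySem.Chars.replace cur [c] []) l0
  -- stack loop collapsing consecutive dots
  let stack := l1.foldl stepA ([] : List Char)
  -- if new_id and new_id[0] == '.': new_id = new_id[1:]
  let l2 := if stack ≠ [] ∧ PySem.List.pyGet? stack 0 = some '.' then PySem.List.slice stack (some 1) none else stack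
  -- if new_id and new_id[-1] == '.': new_id = new_id[:-1]
  let l3 := if l2 ≠ [] ∧ PySem.List.pyGet? l2 (-1) = some '.' then PySem.List.slice l2 none (some (-1)) else l2
  -- if not new_id: new_id = 'a'
  let l4 := if l3 = [] then ['a'] else l3
  -- if len(new_id) >= 16: new_id = new_id[:15]
  let l5 := if 16 ≤ l4.length then PySem.List.slice l4 none (some 15) else l4
  -- if new_id and new_id[-1] == '.': new_id = new_id[:-1]
  let l6 := if l5 ≠ [] ∧ PySem.List.pyGet? l5 (-1) = some '.' then PySem.List.slice l5 none (some (-1)) else l5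
  -- if len(new_id) <= 2: new_id += new_id[-1] * (3 - len(new_id))   (new_id is provably nonempty
  -- here, so Python's `new_id[-1]` never raises; getD's default is unreachable)
  let l7 := if l6.length ≤ 2 then l6 ++ List.replicate (3 - l6.length) ((PySem.List.pyGet? l6 (-1)).getD 'a') else l6
  String.ofList l7

-- ===== PORT B =====
-- Python's `c.isalnum() or c in '-_.'` (single-char membership test)
def keepB (c : Char) : Bool := PySem.Chars.isalnum c || (['-', '_', '.'] : List Char).contains c

def solution_alt (new_id : String) : String :=
  -- kept = [c for c in new_id.lower() if c.isalnum() or c in '-_.']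
  let kept := (PySem.Chars.lower new_id.toList).filter keepB
  -- s = '.'.join(w for w in ''.join(kept).split('.') if w) or 'a'
  let s1 := PySem.Chars.join ['.'] ((kept.splitOn '.').filter (fun w => !w.isEmpty))
  let s2 := if s1 = [] then ['a'] else s1
  -- s = s[:15].rstrip('.')   (rstrip ported by hand: drop the trailing run of dots; exact)
  let s3 := PySem.List.slice s2 none (some 15)
  let s4 := (s3.reverse.dropWhile (fun c => (['.'] : List Char).contains c)).reverse
  -- return s.ljust(3, s[-1])   (s is nonempty here, so `s[-1]` never raises and getD's
  -- default is unreachable; ljust pads on the right to length 3)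
  String.ofList (s4 ++ List.replicate (3 - s4.length) (s4.getLast?.getD 'a'))

-- ===== PRECONDITION & SPEC =====
def Spec_solution (new_id : String) (out : String) : Prop := out = solution_alt new_id
instance (new_id : String) (out : String) : Decidable (Spec_solution new_id out) := by unfold Spec_solution; infer_instance

-- ===== CLAIM (what is proved, stated in full; the proofs are below) =====
def Claim_equal_solution : Prop := ∀ (new_id : String), Dom_solution new_id → Spec_solution new_id (solution new_id)

-- ===== LEMMAS AND PROOFS =====

-- "no two adjacent dots", the invariant of the collapsing loop
def NoDD (a b : Char) : Prop := ¬(a = '.' ∧ b = '.')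

-- named stages of A's fix-up tail (definitionally equal to the let-chain of `solution`)
def aStrip1 (l : List Char) : List Char :=
  if l ≠ [] ∧ PySem.List.pyGet? l 0 = some '.' then PySem.List.slice l (some 1) none else l
def aStrip2 (l : List Char) : List Char :=
  if l ≠ [] ∧ PySem.List.pyGet? l (-1) = some '.' then PySem.List.slice l none (some (-1)) else l
def aFill (l : List Char) : List Char := if l = [] then ['a'] else l
def aTrunc (l : List Char) : List Char :=
  if 16 ≤ l.length then PySem.List.slice l none (some 15) else l
def aPad (l : List Char) : List Char :=
  if l.length ≤ 2 then l ++ List.replicate (3 - l.length) ((PySem.List.pyGet? l (-1)).getD 'a') else l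
-- named stages of B's tail
def bSuffix (l : List Char) : List Char := if l.getLast? = some '.' then l.dropLast else l
def bPad (l : List Char) : List Char := l ++ List.replicate (3 - l.length) (l.getLast?.getD 'a')

-- proof-side names for B's pieces
def rstripD (l : List Char) : List Char := (l.reverse.dropWhile (· == '.')).reverse
def JJ (ws : List (List Char)) : List Char := ws.flatMap (fun w => '.' :: w)
def toks (l : List Char) : List (List Char) := (l.splitOn '.').filter (fun w => !w.isEmpty)
def W (l : List Char) : List Char := (l.splitOn '.').headI
def Rst (l : List Char) : List (List Char) := ((l.splitOn '.').tail).filter (fun w => !w.isEmpty)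

-- break-the-left collapse: what A's stack loop computes, recursively from the front
def coll (a : Char) : List Char → List Char
  | [] => [a]
  | b :: l => if a = '.' ∧ b = '.' then coll a l else a :: coll b l
def collTop : List Char → List Char
  | [] => []
  | c :: t => coll c t

-- ---- A-side lemmas: the replace-loop is a filter, the stack loop is `coll` ----

theorem replace_go_single (c : Char) : ∀ (fuel : Nat) (l acc : List Char), l.length ≤ fuel →
    PySem.Chars.replace.go [c] [] fuel l acc = acc.reverse ++ l.filter (fun x => !(x == c)) := by
  intro fuel
  induction fuel with
  | zero =>
    intro l acc h
    have hl : l = [] := List.eq_nil_of_length_eq_zero (Nat.le_zero.mp h)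
    subst hl
    simp [PySem.Chars.replace.go]
  | succ n ih =>
    intro l acc h
    cases l with
    | nil => simp [PySem.Chars.replace.go]
    | cons d t =>
      by_cases hd : d = c
      · subst hd
        have hpre : [d].isPrefixOf (d :: t) = true := by simp [List.isPrefixOf]
        rw [PySem.Chars.replace.go]
        simp only [hpre, if_true]
        simp only [List.length_cons, List.drop_succ_cons, List.drop_zero, List.reverse_nil,
          List.nil_append, List.length_nil]
        rw [ih t acc (by simpa using h)]
        simp
      · have hpre : [c].isPrefixOf (d :: t) = false := by
          simp only [List.isPrefixOf, Bool.and_eq_false_iff]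
          left
          simp [Ne.symm hd]
        rw [PySem.Chars.replace.go]
        simp only [hpre, Bool.false_eq_true, if_false]
        rw [ih t (d :: acc) (by simpa using h)]
        simp [hd]

theorem replace_single (t : List Char) (c : Char) :
    PySem.Chars.replace t [c] [] = t.filter (fun x => !(x == c)) := by
  rw [PySem.Chars.replace]
  simp [replace_go_single c t.length t [] (le_refl _)]

theorem filter_fold (keep : Char → Bool) : ∀ (l t : List Char),
    l.foldl (fun cur c => if keep c then cur else PySem.Chars.replace cur [c] []) t
      = t.filter (fun x => keep x || !(l.contains x)) := by
  intro l
  induction l with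
  | nil => intro t; simp
  | cons c l ih =>
    intro t
    simp only [List.foldl_cons]
    by_cases hk : keep c
    · rw [if_pos hk, ih]
      apply List.filter_congr
      intro x _
      by_cases hx : x = c
      · subst hx; simp [hk]
      · simp [hx]
    · rw [if_neg hk, ih, replace_single, List.filter_filter]
      apply List.filter_congr
      intro x _
      by_cases hx : x = c
      · subst hx; simp [hk]
      · simp [hx]

theorem filter_fold_self (keep : Char → Bool) (l : List Char) :
    l.foldl (fun cur c => if keep c then cur else PySem.Chars.replace cur [c] []) l
      = l.filter keep := by
  rw [filter_fold]
  apply List.filter_congr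
  intro x hx
  simp [hx]

theorem keepB_eq (c : Char) : keepB c = keepA c := by
  unfold keepA keepB
  cases PySem.Chars.isalnum c
  · by_cases h1 : c = '-' <;> by_cases h2 : c = '_' <;> by_cases h3 : c = '.' <;>
      simp [h1, h2, h3]
  · simp

theorem fold_coll : ∀ (k st : List Char) (a : Char),
    k.foldl stepA (st ++ [a]) = st ++ coll a k := by
  intro k
  induction k with
  | nil => intro st a; simp [coll]
  | cons c t ih =>
    intro st a
    rw [List.foldl_cons]
    by_cases h : a = '.' ∧ c = '.'
    · have hs : stepA (st ++ [a]) c = st ++ [a] := by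
        unfold stepA
        rw [if_pos ⟨by simp, by simp [h.1], h.2⟩]
      rw [hs, ih, coll, if_pos h]
    · have hs : stepA (st ++ [a]) c = (st ++ [a]) ++ [c] := by
        unfold stepA
        rw [if_neg]
        intro ⟨_, hl, hc⟩
        simp at hl
        exact h ⟨hl, hc⟩
      rw [hs, List.append_assoc, ← List.singleton_append, ← List.append_assoc, ih, coll,
        if_neg h, List.append_assoc]
      simp

theorem fold_collTop (k : List Char) : k.foldl stepA [] = collTop k := by
  cases k with
  | nil => rfl
  | cons c t =>
    rw [List.foldl_cons]
    have hs : stepA [] c = [] ++ [c] := by unfold stepA; simp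
    rw [hs, fold_coll]
    rfl

theorem coll_cons_tail (a : Char) (t : List Char) : coll a t = a :: (coll a t).tail := by
  induction t generalizing a with
  | nil => rfl
  | cons b t ih =>
    rw [coll]
    split_ifs with h
    · exact ih a
    · rfl

theorem dotTail : ∀ (t : List Char), (coll '.' t).tail.head? ≠ some '.' := by
  intro t
  induction t with
  | nil => simp [coll]
  | cons b t ih =>
    rw [coll]
    split_ifs with h
    · exact ih
    · have hb : b ≠ '.' := fun hb => h ⟨rfl, hb⟩
      rw [List.tail_cons, coll_cons_tail b t]
      simp [hb]

-- ---- the chain invariant of the stack loop (used where A strips single edge dots) ----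

theorem isChain_foldl_stepA : ∀ (l st : List Char), st.IsChain NoDD → (l.foldl stepA st).IsChain NoDD := by
  intro l
  induction l with
  | nil => intro st h; exact h
  | cons c l ih =>
    intro st h
    rw [List.foldl_cons]
    apply ih
    unfold stepA
    split_ifs with hcond
    · exact h
    · rw [List.isChain_append]
      refine ⟨h, by simp, ?_⟩
      intro x hx y hy
      simp only [List.head?_cons, Option.mem_def, Option.some.injEq] at hy
      subst hy
      intro ⟨hx', hc⟩
      exact hcond ⟨by rintro rfl; simp at hx, by rw [← hx']; exact hx, hc⟩

theorem dropWhile_of_isChain (l : List Char) (h : l.IsChain NoDD) :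
    l.dropWhile (· == '.') = if l.head? = some '.' then l.tail else l := by
  cases l with
  | nil => simp
  | cons a t =>
    by_cases ha : a = '.'
    · subst ha
      rw [if_pos (by simp)]
      simp only [List.dropWhile_cons, BEq.rfl, List.tail_cons]
      cases t with
      | nil => simp
      | cons b t' =>
        have hb : b ≠ '.' := by
          intro hb
          have := List.isChain_cons_cons.mp h
          exact this.1 ⟨rfl, hb⟩
        simp [hb]
    · rw [if_neg (by simp [ha])]
      simp [ha]

theorem reverse_tail_reverse (l : List Char) : (l.reverse.tail).reverse = l.dropLast := by
  rcases List.eq_nil_or_concat l with rfl | ⟨l', a, rfl⟩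
  · simp
  · simp

-- dropping the (unique, by NoDD) trailing dot
theorem strip_trailing_dot (l : List Char) (h : l.IsChain NoDD) :
    rstripD l = if l.getLast? = some '.' then l.dropLast else l := by
  have hrev : l.reverse.IsChain NoDD := by
    rw [List.isChain_reverse]
    exact h.imp (fun hab => by unfold NoDD at *; tauto)
  unfold rstripD
  rw [dropWhile_of_isChain _ hrev, List.head?_reverse]
  split_ifs with hl
  · exact reverse_tail_reverse l
  · simp

theorem pyGet0 (l : List Char) : PySem.List.pyGet? l 0 = l.head? := by
  simp [pysem]
  exact List.head?_eq_getElem?.symm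

theorem pyGetNeg1 (l : List Char) : PySem.List.pyGet? l (-1) = l.getLast? := by
  simp [pysem]

theorem sliceNeg1 (l : List Char) : PySem.List.slice l none (some (-1)) = l.dropLast := by
  simp [pysem]

theorem slice1 (l : List Char) : PySem.List.slice l (some 1) none = l.tail := by
  rw [PySem.List.slice_from l (by norm_num : (0:Int) ≤ 1)]
  simp

theorem aStrip1_eq (M : List Char) (h : M.IsChain NoDD) :
    aStrip1 M = M.dropWhile (· == '.') := by
  rw [dropWhile_of_isChain M h]
  unfold aStrip1
  rw [pyGet0, slice1]
  cases M with
  | nil => simp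
  | cons a t => by_cases ha : a = '.' <;> simp [ha]

theorem aStrip2_eq_bSuffix (l : List Char) : aStrip2 l = bSuffix l := by
  unfold aStrip2 bSuffix
  rw [pyGetNeg1, sliceNeg1]
  cases l with
  | nil => simp
  | cons a t => simp

theorem hpredDot : (fun c => (['.'] : List Char).contains c) = (fun c : Char => c == '.') := by
  funext c; by_cases hc : c = '.' <;> simp [hc]

theorem strip12 (M : List Char) (h : M.IsChain NoDD) :
    aStrip2 (aStrip1 M) = rstripD (M.dropWhile (· == '.')) := by
  have hD : (M.dropWhile (· == '.')).IsChain NoDD :=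
    h.suffix (List.dropWhile_suffix _)
  rw [aStrip1_eq M h, aStrip2_eq_bSuffix, strip_trailing_dot _ hD]
  unfold bSuffix
  rfl

theorem stripChars_eq (M : List Char) :
    PySem.Chars.stripChars M ['.'] = rstripD (M.dropWhile (· == '.')) := by
  unfold PySem.Chars.stripChars rstripD
  rw [hpredDot]

theorem aTrunc_eq (l : List Char) : aTrunc l = PySem.List.slice l none (some 15) := by
  unfold aTrunc
  rw [PySem.List.slice_to l (by norm_num : (0:Int) ≤ 15)]
  split_ifs with hl
  · rfl
  · exact (List.take_of_length_le (by omega)).symm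

theorem aPad_eq_bPad (l : List Char) : aPad l = bPad l := by
  unfold aPad bPad
  rw [pyGetNeg1]
  split_ifs with hl
  · rfl
  · have hz : 3 - l.length = 0 := by omega
    simp [hz]

-- ---- B-side: splitOn / join arithmetic ----

theorem rstripD_cons (a : Char) (x : List Char) :
    rstripD (a :: x) = if rstripD x = [] then (if a = '.' then [] else [a]) else a :: rstripD x := by
  unfold rstripD
  rw [List.reverse_cons, List.dropWhile_append]
  by_cases h : List.dropWhile (· == '.') x.reverse = []
  · rw [h]
    simp only [List.isEmpty_nil, if_true, List.reverse_nil]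
    by_cases ha : a = '.'
    · simp [List.dropWhile, ha]
    · have hb : (a == '.') = false := by simp [ha]
      simp [List.dropWhile, hb, ha]
  · have : (List.dropWhile (· == '.') x.reverse).isEmpty = false := by
      simpa [List.isEmpty_iff] using h
    rw [this]
    simp [h]

theorem splitD_cons_dot (t : List Char) : ('.' :: t).splitOn '.' = [] :: t.splitOn '.' := by
  simp [List.splitOn, List.splitOnP_cons]

theorem splitD_cons_ne {c : Char} (hc : c ≠ '.') (t : List Char) :
    (c :: t).splitOn '.' = (c :: W t) :: (t.splitOn '.').tail := by
  unfold W
  rw [List.splitOn, List.splitOnP_cons, if_neg (by simp [hc])]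
  obtain ⟨h, rest, e⟩ := List.exists_cons_of_ne_nil (List.splitOnP_ne_nil (fun x => x == '.') t)
  rw [List.splitOn] at *
  rw [e]
  simp

theorem toks_nil : toks [] = [] := by simp [toks]
theorem toks_cons_dot (t : List Char) : toks ('.' :: t) = toks t := by
  simp [toks, splitD_cons_dot]
theorem toks_cons_ne {c : Char} (hc : c ≠ '.') (t : List Char) :
    toks (c :: t) = (c :: W t) :: Rst t := by
  rw [toks, splitD_cons_ne hc]
  simp [Rst]
theorem W_dot (t : List Char) : W ('.' :: t) = [] := by simp [W, splitD_cons_dot]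
theorem Rst_dot (t : List Char) : Rst ('.' :: t) = toks t := by
  simp [Rst, splitD_cons_dot, toks]
theorem W_ne {c : Char} (hc : c ≠ '.') (t : List Char) : W (c :: t) = c :: W t := by
  simp [W, splitD_cons_ne hc]
theorem Rst_ne {c : Char} (hc : c ≠ '.') (t : List Char) : Rst (c :: t) = Rst t := by
  simp [Rst, splitD_cons_ne hc]
theorem W_nil : W [] = [] := by simp [W]
theorem Rst_nil : Rst [] = [] := by simp [Rst]

theorem inter_cons2 (s x y : List Char) (l : List (List Char)) :
    List.intercalate s (x :: y :: l) = x ++ s ++ List.intercalate s (y :: l) := by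
  simp [List.intercalate, List.intersperse]

theorem inter_cons (w : List Char) (ws : List (List Char)) :
    List.intercalate ['.'] (w :: ws) = w ++ JJ ws := by
  induction ws generalizing w with
  | nil => simp [List.intercalate, List.intersperse, JJ]
  | cons v ws ih =>
    rw [inter_cons2, ih v]
    simp [JJ]

-- the heart of the B-side: collapsing from the front computes the dot-joined nonempty tokens
theorem collMain : ∀ t : List Char,
    rstripD (coll '.' t) = JJ (toks t) ∧
    ∀ c : Char, c ≠ '.' → rstripD (coll c t) = c :: (W t ++ JJ (Rst t)) := by
  intro t
  induction t with
  | nil =>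
    constructor
    · simp [coll, rstripD, List.dropWhile, toks_nil, JJ]
    · intro c hc
      simp [coll, rstripD, hc, W_nil, Rst_nil, JJ]
  | cons b t ih =>
    obtain ⟨ihL, ihM⟩ := ih
    constructor
    · rw [coll]
      by_cases hb : b = '.'
      · rw [if_pos ⟨rfl, hb⟩]
        subst hb
        rw [ihL, toks_cons_dot]
      · rw [if_neg (fun h => hb h.2), rstripD_cons, ihM b hb]
        rw [if_neg (by simp)]
        rw [toks_cons_ne hb]
        simp [JJ]
    · intro c hc
      rw [coll, if_neg (fun h => hc h.1), rstripD_cons]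
      by_cases hb : b = '.'
      · subst hb
        rw [ihL]
        by_cases hz : JJ (toks t) = []
        · rw [hz, if_pos rfl, if_neg hc, W_dot, Rst_dot, hz]
          simp
        · rw [if_neg hz, W_dot, Rst_dot]
          simp
      · rw [ihM b hb, if_neg (by simp), W_ne hb, Rst_ne hb]
        simp

theorem stripChars_collTop (k : List Char) :
    PySem.Chars.stripChars (collTop k) ['.'] = List.intercalate ['.'] (toks k) := by
  rw [stripChars_eq]
  cases k with
  | nil => simp [collTop, rstripD, toks_nil, List.intercalate]
  | cons c t =>
    unfold collTop
    by_cases hc : c = '.'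
    · subst hc
      have hd := dotTail t
      have hct := coll_cons_tail '.' t
      set d := (coll '.' t).tail with hdd
      have hdrop : List.dropWhile (· == '.') (coll '.' t) = d := by
        rw [hct]
        simp only [List.dropWhile_cons, BEq.rfl, if_true]
        cases hd' : d with
        | nil => simp
        | cons e d' =>
          have he : e ≠ '.' := by
            intro he
            exact hd (by rw [hd', he]; rfl)
          simp [he]
      rw [hdrop]
      have hL := (collMain t).1
      rw [hct, rstripD_cons] at hL
      rw [toks_cons_dot]
      cases htk : toks t with
      | nil =>
        rw [htk] at hL
        simp only [JJ, List.flatMap_nil] at hL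
        by_cases hz : rstripD d = []
        · rw [hz]
          simp [List.intercalate]
        · rw [if_neg hz] at hL
          exact absurd hL (by simp)
      | cons w ws =>
        rw [htk] at hL
        simp only [JJ, List.flatMap_cons] at hL
        by_cases hz : rstripD d = []
        · rw [if_pos hz] at hL
          exact absurd hL.symm (by simp)
        · rw [if_neg hz] at hL
          rw [inter_cons]
          have h2 := hL
          simp only [List.cons_append, List.cons.injEq, true_and] at h2
          exact h2
    · have hM := (collMain t).2 c hc
      have hdrop : List.dropWhile (· == '.') (coll c t) = coll c t := by
        rw [coll_cons_tail c t]
        simp [hc]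
      rw [hdrop, hM, toks_cons_ne hc, inter_cons]
      simp

-- chains survive stripping and truncation
theorem chain_rstripD {l : List Char} (h : l.IsChain NoDD) : (rstripD l).IsChain NoDD := by
  apply h.prefix
  have hs : l.reverse.dropWhile (· == '.') <:+ l.reverse := List.dropWhile_suffix _
  have := (List.reverse_suffix (l₁ := (l.reverse.dropWhile (· == '.')).reverse) (l₂ := l)).mp
    (by simpa using hs)
  exact this

-- ===== VERDICT (by name: the statement is the Claim_ definition above) =====
set_option maxHeartbeats 1000000 in
theorem solution_spec : Claim_equal_solution := by
  intro s _
  unfold Spec_solution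
  have hA : solution s = String.ofList (aPad (aStrip2 (aTrunc (aFill (aStrip2 (aStrip1
      (((PySem.Chars.lower s.toList).foldl
          (fun cur c => if keepA c then cur else PySem.Chars.replace cur [c] [])
          (PySem.Chars.lower s.toList)).foldl stepA []))))))) := rfl
  have hB : solution_alt s = String.ofList (bPad (((PySem.List.slice
      (aFill (PySem.Chars.join ['.'] ((((PySem.Chars.lower s.toList).filter keepB).splitOn '.').filter (fun w => !w.isEmpty))))
      none (some 15)).reverse.dropWhile (fun c => (['.'] : List Char).contains c)).reverse)) := rfl
  have hfB : (PySem.Chars.lower s.toList).filter keepB = (PySem.Chars.lower s.toList).filter keepA :=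
    List.filter_congr (fun x _ => keepB_eq x)
  set k := (PySem.Chars.lower s.toList).filter keepA with hk
  have hM : ((PySem.Chars.lower s.toList).foldl
      (fun cur c => if keepA c then cur else PySem.Chars.replace cur [c] [])
      (PySem.Chars.lower s.toList)).foldl stepA ([] : List Char) = collTop k := by
    rw [filter_fold_self, fold_collTop]
  have hch : (collTop k).IsChain NoDD := by
    rw [← fold_collTop]
    exact isChain_foldl_stepA _ _ (by simp)
  have hmid : aStrip2 (aStrip1 (collTop k)) = List.intercalate ['.'] (toks k) := by
    rw [strip12 _ hch, ← stripChars_eq, stripChars_collTop]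
  have hjoin : PySem.Chars.join ['.'] ((k.splitOn '.').filter (fun w => !w.isEmpty))
      = List.intercalate ['.'] (toks k) := rfl
  have hchmid : (List.intercalate ['.'] (toks k)).IsChain NoDD := by
    rw [← hmid, strip12 _ hch]
    exact chain_rstripD (hch.suffix (List.dropWhile_suffix _))
  have hchfill : (aFill (List.intercalate ['.'] (toks k))).IsChain NoDD := by
    unfold aFill
    split_ifs with h
    · simp
    · exact hchmid
  have hchtr : (PySem.List.slice (aFill (List.intercalate ['.'] (toks k))) none (some 15)).IsChain NoDD := by
    rw [← aTrunc_eq]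
    unfold aTrunc
    split_ifs with h
    · rw [PySem.List.slice_to _ (by norm_num : (0:Int) ≤ 15)]
      exact hchfill.prefix (List.take_prefix _ _)
    · exact hchfill
  rw [hA, hB, hM, hmid, hfB, hjoin]
  have hrs : ((PySem.List.slice (aFill (List.intercalate ['.'] (toks k))) none
      (some 15)).reverse.dropWhile (fun c => (['.'] : List Char).contains c)).reverse
      = rstripD (PySem.List.slice (aFill (List.intercalate ['.'] (toks k))) none (some 15)) := by
    unfold rstripD
    rw [hpredDot]
  rw [aTrunc_eq, hrs, strip_trailing_dot _ hchtr, aStrip2_eq_bSuffix, aPad_eq_bPad]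
  unfold bSuffix
  rfl
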